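-- pv_equiv track=rewrite | github.com/yamada3-1990/coding-test | HackerRank/TheBombermanGame.py | calc
-- ===== SOURCE A (Python) =====
-- def calc(base_grid_list, bomb_locations_grid_list):
--     R = len(base_grid_list)
--     C = len(base_grid_list[0])
--     dx = [0, 0, 1, -1]
--     dy = [1, -1, 0, 0]
--
--     next_state_grid = [row[:] for row in base_grid_list]
--     explode_cells = set()
--
--     for r in range(R):
--         for c in range(C):
--             if bomb_locations_grid_list[r][c] == 'O':
--                 explode_cells.add((r, c))
--                 for k in range(4):
--                     nr, nc = r + dy[k], c + dx[k]
--                     if 0 <= nr < R and 0 <= nc < C: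
--                         explode_cells.add((nr, nc))
--     for r, c in explode_cells:
--         next_state_grid[r][c] = '.'
--
--     return next_state_grid
-- ===== SOURCE B (Python) =====
-- def calc(base_grid_list, bomb_locations_grid_list):
--     R = len(base_grid_list)
--     C = len(base_grid_list[0])
--
--     def bomb_at(r, c):
--         return 0 <= r < R and 0 <= c < C and bomb_locations_grid_list[r][c] == 'O'
--
--     next_state_grid = []
--     for r, row in enumerate(base_grid_list):
--         new_row = row[:]
--         for c in range(C):
--             if (bomb_at(r, c) or bomb_at(r - 1, c) or bomb_at(r + 1, c)
--                     or bomb_at(r, c - 1) or bomb_at(r, c + 1)):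
--                 new_row[c] = '.'
--         next_state_grid.append(new_row)
--     return next_state_grid
-- ===== Notes on version B (the rewrite author's own statement) =====
-- stated objective: simpler
-- what changed: Replaces A's push-style two-phase algorithm (collect every bomb cell and its in-bounds neighbors into an explode_cells set, then rewrite the copied grid at those cells) with a single pull-style pass that copies each row and blanks each cell of the R-by-C grid whose own 5-cell neighborhood contains a bomb, dropping the set and the separate mutation phase.
import Mathlib
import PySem

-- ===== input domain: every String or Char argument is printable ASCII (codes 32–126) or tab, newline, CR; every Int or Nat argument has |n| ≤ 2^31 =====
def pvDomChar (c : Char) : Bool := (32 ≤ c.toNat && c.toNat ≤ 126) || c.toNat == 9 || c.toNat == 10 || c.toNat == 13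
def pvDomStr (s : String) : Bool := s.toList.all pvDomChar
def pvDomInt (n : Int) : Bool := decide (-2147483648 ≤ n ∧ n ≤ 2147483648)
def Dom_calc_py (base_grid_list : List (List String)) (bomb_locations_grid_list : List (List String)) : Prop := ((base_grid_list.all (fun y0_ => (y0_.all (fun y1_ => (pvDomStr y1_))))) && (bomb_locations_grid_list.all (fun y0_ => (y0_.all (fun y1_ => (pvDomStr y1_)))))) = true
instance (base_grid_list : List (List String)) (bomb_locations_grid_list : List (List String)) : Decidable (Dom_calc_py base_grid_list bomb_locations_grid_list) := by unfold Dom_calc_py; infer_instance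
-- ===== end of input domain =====

-- B replaces A's push-style two-phase algorithm (collect a set of exploded cells, then rewrite the
-- copied grid at those cells) by a single pull-style per-cell neighborhood test; objective: simpler.


-- ===== PORT A =====
def calc_py (base_grid_list : List (List String)) (bomb_locations_grid_list : List (List String)) : List (List String) :=
  let R : Int := base_grid_list.length
  let C : Int := (PySem.List.pyGetD base_grid_list 0 []).length
  let dx : List Int := [0, 0, 1, -1]
  let dy : List Int := [1, -1, 0, 0]
  let next_state_grid := base_grid_list
  let explode_cells : PySem.Set (Int × Int) :=
    (PySem.List.pyRange 0 R 1).foldl (fun ex r =>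
      (PySem.List.pyRange 0 C 1).foldl (fun ex c =>
        if PySem.List.pyGetD (PySem.List.pyGetD bomb_locations_grid_list r []) c "" = "O" then
          (PySem.List.pyRange 0 4 1).foldl (fun ex k =>
            let nr := r + PySem.List.pyGetD dy k 0
            let nc := c + PySem.List.pyGetD dx k 0
            if 0 ≤ nr ∧ nr < R ∧ 0 ≤ nc ∧ nc < C then PySem.Set.add ex (nr, nc) else ex)
            (PySem.Set.add ex (r, c))
        else ex) ex) PySem.Set.empty
  explode_cells.foldl (fun g rc =>
    PySem.List.pySetD g rc.1 (PySem.List.pySetD (PySem.List.pyGetD g rc.1 []) rc.2 ".")) next_state_grid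

-- ===== PORT B =====
def calc_py_alt (base_grid_list : List (List String)) (bomb_locations_grid_list : List (List String)) : List (List String) :=
  let R : Int := base_grid_list.length
  let C : Int := (PySem.List.pyGetD base_grid_list 0 []).length
  let bomb_at : Int → Int → Bool := fun r c =>
    decide (0 ≤ r) && decide (r < R) && decide (0 ≤ c) && decide (c < C) &&
      (PySem.List.pyGetD (PySem.List.pyGetD bomb_locations_grid_list r []) c "" == "O")
  (PySem.List.enumerate base_grid_list 0).map (fun p =>
    (PySem.List.pyRange 0 C 1).foldl (fun new_row c =>
      if bomb_at p.1 c || bomb_at (p.1 - 1) c || bomb_at (p.1 + 1) c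
          || bomb_at p.1 (c - 1) || bomb_at p.1 (c + 1)
      then PySem.List.pySetD new_row c "." else new_row) p.2)

-- ===== PRECONDITION & SPEC =====
-- whether cell (r, c) of the bomb grid holds a bomb (Nat coordinates, total lookup)
def pvBombAtN (bomb : List (List String)) (r c : Nat) : Bool :=
  ((bomb.getD r []).getD c "") == "O"

-- whether cell (r, c) is a bomb or has an in-bounds bomb neighbor, in an R × C grid
def pvBlastN (bomb : List (List String)) (R C r c : Nat) : Bool :=
  pvBombAtN bomb r c
    || (decide (0 < r) && pvBombAtN bomb (r - 1) c)
    || (decide (r + 1 < R) && pvBombAtN bomb (r + 1) c)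
    || (decide (0 < c) && pvBombAtN bomb r (c - 1))
    || (decide (c + 1 < C) && pvBombAtN bomb r (c + 1))

-- Pre_ is exactly where Python A returns normally: base nonempty (A reads base[0]); the bomb grid
-- has at least R rows each of length at least C (A reads bomb[r][c] for all r < R, c < C); and every
-- exploded cell lies inside its (possibly ragged) base row (A assigns next[r][c] = '.' there).
def Pre_calc_py (base_grid_list : List (List String)) (bomb_locations_grid_list : List (List String)) : Prop :=
  base_grid_list ≠ [] ∧
  (0 < (base_grid_list.headD []).length →
    base_grid_list.length ≤ bomb_locations_grid_list.length ∧
    ∀ r < base_grid_list.length,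
      (base_grid_list.headD []).length ≤ (bomb_locations_grid_list.getD r []).length) ∧
  (∀ r < base_grid_list.length, ∀ c < (base_grid_list.headD []).length,
      pvBlastN bomb_locations_grid_list base_grid_list.length (base_grid_list.headD []).length r c = true →
      c < (base_grid_list.getD r []).length)

instance (base_grid_list : List (List String)) (bomb_locations_grid_list : List (List String)) : Decidable (Pre_calc_py base_grid_list bomb_locations_grid_list) := by unfold Pre_calc_py; infer_instance

def pvWitness_calc_py : List (List String) × List (List String) :=
  ([["a", "b", "c"], ["d", "e", "f"]], [[".", "O", "."], [".", ".", "."]])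

def Spec_calc_py (base_grid_list : List (List String)) (bomb_locations_grid_list : List (List String)) (out : List (List String)) : Prop := out = calc_py_alt base_grid_list bomb_locations_grid_list
instance (base_grid_list : List (List String)) (bomb_locations_grid_list : List (List String)) (out : List (List String)) : Decidable (Spec_calc_py base_grid_list bomb_locations_grid_list out) := by unfold Spec_calc_py; infer_instance

-- ===== CLAIM (what is proved, stated in full; the proofs are below) =====
def Claim_equal_calc_py : Prop := ∀ (base_grid_list : List (List String)) (bomb_locations_grid_list : List (List String)), Dom_calc_py base_grid_list bomb_locations_grid_list → Pre_calc_py base_grid_list bomb_locations_grid_list → Spec_calc_py base_grid_list bomb_locations_grid_list (calc_py base_grid_list bomb_locations_grid_list)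

-- ===== LEMMAS AND PROOFS =====

-- A's two phases, named so the proof can talk about them
def pvWriteOne (g : List (List String)) (a b : Int) : List (List String) :=
  PySem.List.pySetD g a (PySem.List.pySetD (PySem.List.pyGetD g a []) b ".")

def pvWriteFold (cells : List (Int × Int)) (g : List (List String)) : List (List String) :=
  cells.foldl (fun g rc => pvWriteOne g rc.1 rc.2) g

def pvExplode (base bomb : List (List String)) : List (Int × Int) :=
  (PySem.List.pyRange 0 (base.length : Int) 1).foldl (fun ex r =>
    (PySem.List.pyRange 0 ((PySem.List.pyGetD base 0 []).length : Int) 1).foldl (fun ex c =>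
      if PySem.List.pyGetD (PySem.List.pyGetD bomb r []) c "" = "O" then
        (PySem.List.pyRange 0 4 1).foldl (fun ex k =>
          let nr := r + PySem.List.pyGetD ([1, -1, 0, 0] : List Int) k 0
          let nc := c + PySem.List.pyGetD ([0, 0, 1, -1] : List Int) k 0
          if 0 ≤ nr ∧ nr < (base.length : Int) ∧ 0 ≤ nc ∧ nc < ((PySem.List.pyGetD base 0 []).length : Int)
          then PySem.Set.add ex (nr, nc) else ex)
          (PySem.Set.add ex (r, c))
      else ex) ex) PySem.Set.empty

theorem pv_calc_py_eq (base bomb : List (List String)) :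
    calc_py base bomb = pvWriteFold (pvExplode base bomb) base := rfl

theorem pv_getD_set {α : Type} [Inhabited α] (g : List α) (n : Nat) (v : α) (i : Nat) (d : α) :
    (g.set n v).getD i d = if n = i ∧ n < g.length then v else g.getD i d := by
  simp only [List.getD, List.getElem?_set]
  split_ifs with h1 h2 h3 <;> simp_all; omega

theorem pvWriteOne_length (g : List (List String)) (a b : Int) :
    (pvWriteOne g a b).length = g.length := by
  simp [pvWriteOne, PySem.List.length_pySetD]

theorem pvWriteOne_row_length (g : List (List String)) {a : Int} (b : Int) (ha : 0 ≤ a) (i : Nat) :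
    ((pvWriteOne g a b).getD i []).length = ((g.getD i []) : List String).length := by
  rw [pvWriteOne, PySem.List.pySetD_of_nonneg _ _ ha, PySem.List.pyGetD_of_nonneg _ _ ha,
    pv_getD_set]
  split_ifs with h
  · rw [h.1, PySem.List.length_pySetD]
  · rfl

theorem pvWriteOne_getD (g : List (List String)) {a b : Int} (ha : 0 ≤ a) (hb : 0 ≤ b)
    (i j : Nat) :
    ((pvWriteOne g a b).getD i []).getD j "" =
      if (a, b) = ((i : Int), (j : Int)) ∧ i < g.length ∧ j < (g.getD i []).length then "."
      else (g.getD i []).getD j "" := by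
  obtain ⟨a, rfl⟩ : ∃ a' : Nat, a = (a' : Int) := ⟨a.toNat, by omega⟩
  obtain ⟨b, rfl⟩ : ∃ b' : Nat, b = (b' : Int) := ⟨b.toNat, by omega⟩
  rw [pvWriteOne, PySem.List.pySetD_natCast, PySem.List.pyGetD_natCast,
    PySem.List.pySetD_natCast, pv_getD_set]
  simp only [Prod.mk.injEq, Nat.cast_inj]
  by_cases h1 : a = i ∧ a < g.length
  · obtain ⟨rfl, hilen⟩ := h1
    rw [if_pos ⟨rfl, hilen⟩, pv_getD_set]
    by_cases h2 : b = j ∧ b < (g.getD a []).length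
    · obtain ⟨rfl, hjlen⟩ := h2
      rw [if_pos ⟨rfl, hjlen⟩, if_pos ⟨⟨rfl, rfl⟩, hilen, hjlen⟩]
    · rw [if_neg h2, if_neg]
      rintro ⟨⟨-, rfl⟩, -, hj⟩
      exact h2 ⟨rfl, hj⟩
  · rw [if_neg h1, if_neg]
    rintro ⟨⟨rfl, -⟩, hi, -⟩
    exact h1 ⟨rfl, hi⟩

theorem pvWriteFold_length (cells : List (Int × Int)) (g : List (List String)) :
    (pvWriteFold cells g).length = g.length := by
  induction cells generalizing g with
  | nil => rfl
  | cons p cs ih => rw [pvWriteFold, List.foldl_cons, ← pvWriteFold, ih, pvWriteOne_length]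

theorem pvWriteFold_row_length (cells : List (Int × Int))
    (hnn : ∀ p ∈ cells, 0 ≤ p.1 ∧ 0 ≤ p.2) (g : List (List String)) (i : Nat) :
    ((pvWriteFold cells g).getD i []).length = ((g.getD i []) : List String).length := by
  induction cells generalizing g with
  | nil => rfl
  | cons p cs ih =>
    rw [pvWriteFold, List.foldl_cons, ← pvWriteFold,
      ih (fun q hq => hnn q (List.mem_cons_of_mem _ hq)),
      pvWriteOne_row_length _ _ (hnn p List.mem_cons_self).1]

theorem pvWriteFold_getD (cells : List (Int × Int))
    (hnn : ∀ p ∈ cells, 0 ≤ p.1 ∧ 0 ≤ p.2) (g : List (List String)) (i j : Nat) :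
    ((pvWriteFold cells g).getD i []).getD j "" =
      if ((i : Int), (j : Int)) ∈ cells ∧ i < g.length ∧ j < (g.getD i []).length then "."
      else (g.getD i []).getD j "" := by
  induction cells generalizing g with
  | nil => simp [pvWriteFold]
  | cons p cs ih =>
    obtain ⟨ha, hb⟩ := hnn p List.mem_cons_self
    rw [pvWriteFold, List.foldl_cons, ← pvWriteFold,
      ih (fun q hq => hnn q (List.mem_cons_of_mem _ hq)),
      pvWriteOne_length, pvWriteOne_row_length _ _ ha, pvWriteOne_getD _ ha hb]
    by_cases hmem : ((i : Int), (j : Int)) ∈ cs <;>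
      by_cases hi : i < g.length <;> by_cases hj : j < (g.getD i []).length <;>
      by_cases hp : (p.1, p.2) = ((i : Int), (j : Int)) <;>
      simp_all [eq_comm]

theorem pv_mem_foldl_addlike {α β : Type} (f : List α → β → List α) (P : β → α → Prop)
    (hf : ∀ s b x, x ∈ f s b ↔ x ∈ s ∨ P b x) (l : List β) (s : List α) (x : α) :
    x ∈ l.foldl f s ↔ x ∈ s ∨ ∃ b ∈ l, P b x := by
  induction l generalizing s with
  | nil => simp
  | cons b l ih => simp only [List.foldl_cons, ih, hf, List.mem_cons]; aesop

theorem pv_mem_add_if {α : Type} [BEq α] [LawfulBEq α] (p : Prop) [Decidable p]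
    (s : PySem.Set α) (y x : α) :
    (x ∈ if p then PySem.Set.add s y else s) ↔ x ∈ s ∨ (p ∧ x = y) := by
  split_ifs with h <;> simp [PySem.Set.mem_add, h]

-- the cell (r, c) of A's bomb scan contributes x to explode_cells
def pvHit (R C : Int) (bomb : List (List String)) (r c : Int) (x : Int × Int) : Prop :=
  PySem.List.pyGetD (PySem.List.pyGetD bomb r []) c "" = "O" ∧
  (x = (r, c) ∨
   (0 ≤ r + 1 ∧ r + 1 < R ∧ 0 ≤ c ∧ c < C ∧ x = (r + 1, c)) ∨
   (0 ≤ r - 1 ∧ r - 1 < R ∧ 0 ≤ c ∧ c < C ∧ x = (r - 1, c)) ∨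
   (0 ≤ r ∧ r < R ∧ 0 ≤ c + 1 ∧ c + 1 < C ∧ x = (r, c + 1)) ∨
   (0 ≤ r ∧ r < R ∧ 0 ≤ c - 1 ∧ c - 1 < C ∧ x = (r, c - 1)))

set_option maxHeartbeats 1000000 in
theorem pv_mem_inner (R C : Int) (bomb : List (List String)) (r c : Int)
    (ex : PySem.Set (Int × Int)) (x : Int × Int)
    (hO : PySem.List.pyGetD (PySem.List.pyGetD bomb r []) c "" = "O") :
    (x ∈ (PySem.List.pyRange 0 4 1).foldl (fun ex k =>
            let nr := r + PySem.List.pyGetD ([1, -1, 0, 0] : List Int) k 0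
            let nc := c + PySem.List.pyGetD ([0, 0, 1, -1] : List Int) k 0
            if 0 ≤ nr ∧ nr < R ∧ 0 ≤ nc ∧ nc < C then PySem.Set.add ex (nr, nc) else ex)
          (PySem.Set.add ex (r, c))) ↔
      x ∈ ex ∨ pvHit R C bomb r c x := by
  rw [show PySem.List.pyRange 0 4 1 = [0, 1, 2, 3] from by decide]
  simp only [List.foldl_cons, List.foldl_nil]
  simp only [show PySem.List.pyGetD ([1, -1, 0, 0] : List Int) 0 0 = 1 from by decide,
    show PySem.List.pyGetD ([1, -1, 0, 0] : List Int) 1 0 = -1 from by decide,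
    show PySem.List.pyGetD ([1, -1, 0, 0] : List Int) 2 0 = 0 from by decide,
    show PySem.List.pyGetD ([1, -1, 0, 0] : List Int) 3 0 = 0 from by decide,
    show PySem.List.pyGetD ([0, 0, 1, -1] : List Int) 0 0 = 0 from by decide,
    show PySem.List.pyGetD ([0, 0, 1, -1] : List Int) 1 0 = 0 from by decide,
    show PySem.List.pyGetD ([0, 0, 1, -1] : List Int) 2 0 = 1 from by decide,
    show PySem.List.pyGetD ([0, 0, 1, -1] : List Int) 3 0 = -1 from by decide]
  simp only [pv_mem_add_if, PySem.Set.mem_add, pvHit, hO, true_and, add_zero]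
  tauto

set_option maxHeartbeats 1000000 in
theorem pv_mem_explode (base bomb : List (List String)) (x : Int × Int) :
    x ∈ pvExplode base bomb ↔
    ∃ r, (0 ≤ r ∧ r < (base.length : Int)) ∧ ∃ c,
      (0 ≤ c ∧ c < ((PySem.List.pyGetD base 0 []).length : Int)) ∧
      pvHit (base.length : Int) ((PySem.List.pyGetD base 0 []).length : Int) bomb r c x := by
  rw [pvExplode, pv_mem_foldl_addlike _
    (fun r x => ∃ c ∈ PySem.List.pyRange 0 ((PySem.List.pyGetD base 0 []).length : Int) 1,
      pvHit (base.length : Int) ((PySem.List.pyGetD base 0 []).length : Int) bomb r c x)]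
  · simp only [PySem.Set.empty, List.not_mem_nil, false_or, PySem.List.mem_pyRange_one]
  · intro s r x
    rw [pv_mem_foldl_addlike _
      (fun c x => pvHit (base.length : Int) ((PySem.List.pyGetD base 0 []).length : Int) bomb r c x)]
    intro s c x
    split_ifs with hO
    · rw [pv_mem_inner _ _ _ _ _ _ _ hO]
    · constructor
      · exact Or.inl
      · rintro (h | ⟨hB, -⟩)
        · exact h
        · exact absurd hB hO

theorem pv_explode_nonneg (base bomb : List (List String)) :
    ∀ p ∈ pvExplode base bomb, 0 ≤ p.1 ∧ 0 ≤ p.2 := by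
  intro p hp
  rw [pv_mem_explode] at hp
  obtain ⟨r, ⟨hr0, -⟩, c, ⟨hc0, -⟩, -, hx⟩ := hp
  rcases hx with rfl | ⟨h1, -, -, -, rfl⟩ | ⟨h1, -, -, -, rfl⟩ | ⟨-, -, h1, -, rfl⟩ |
    ⟨-, -, h1, -, rfl⟩ <;> exact ⟨by omega, by omega⟩

theorem pv_bombAt_cast (bomb : List (List String)) (a b : Nat) :
    (PySem.List.pyGetD (PySem.List.pyGetD bomb (a : Int) []) (b : Int) "" = "O") ↔
      pvBombAtN bomb a b = true := by
  rw [PySem.List.pyGetD_natCast, PySem.List.pyGetD_natCast, pvBombAtN, beq_iff_eq]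

theorem pv_explode_iff_blast (RN CN : Nat) (bomb : List (List String)) (i j : Nat) :
    (∃ r, (0 ≤ r ∧ r < (RN : Int)) ∧ ∃ c, (0 ≤ c ∧ c < (CN : Int)) ∧
        pvHit (RN : Int) (CN : Int) bomb r c ((i : Int), (j : Int))) ↔
      (i < RN ∧ j < CN ∧ pvBlastN bomb RN CN i j = true) := by
  constructor
  · rintro ⟨r, ⟨hr0, hrR⟩, c, ⟨hc0, hcC⟩, hO, hx⟩
    obtain ⟨a, rfl⟩ : ∃ a' : Nat, r = (a' : Int) := ⟨r.toNat, by omega⟩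
    obtain ⟨b, rfl⟩ : ∃ b' : Nat, c = (b' : Int) := ⟨c.toNat, by omega⟩
    rw [pv_bombAt_cast] at hO
    simp only [Prod.mk.injEq] at hx
    rw [pvBlastN]
    simp only [Bool.or_eq_true, Bool.and_eq_true, decide_eq_true_eq]
    rcases hx with ⟨hi, hj⟩ | ⟨-, h1, -, -, hi, hj⟩ | ⟨h0, -, -, -, hi, hj⟩ |
      ⟨-, -, -, h2, hi, hj⟩ | ⟨-, -, h3, -, hi, hj⟩
    · refine ⟨by omega, by omega, Or.inl (Or.inl (Or.inl (Or.inl ?_)))⟩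
      obtain rfl : i = a := by omega
      obtain rfl : j = b := by omega
      exact hO
    · refine ⟨by omega, by omega, Or.inl (Or.inl (Or.inl (Or.inr ⟨by omega, ?_⟩)))⟩
      obtain rfl : j = b := by omega
      have : i - 1 = a := by omega
      rw [this]; exact hO
    · refine ⟨by omega, by omega, Or.inl (Or.inl (Or.inr ⟨by omega, ?_⟩))⟩
      obtain rfl : j = b := by omega
      have : i + 1 = a := by omega
      rw [this]; exact hO
    · refine ⟨by omega, by omega, Or.inl (Or.inr ⟨by omega, ?_⟩)⟩
      obtain rfl : i = a := by omega
      have : j - 1 = b := by omega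
      rw [this]; exact hO
    · refine ⟨by omega, by omega, Or.inr ⟨by omega, ?_⟩⟩
      obtain rfl : i = a := by omega
      have : j + 1 = b := by omega
      rw [this]; exact hO
  · rintro ⟨hiR, hjC, hbl⟩
    rw [pvBlastN] at hbl
    simp only [Bool.or_eq_true, Bool.and_eq_true, decide_eq_true_eq] at hbl
    rcases hbl with ((((hO | ⟨h0, hO⟩) | ⟨hR, hO⟩) | ⟨hc0, hO⟩) | ⟨hcC, hO⟩)
    · exact ⟨(i : Int), ⟨by omega, by omega⟩, (j : Int), ⟨by omega, by omega⟩,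
        (pv_bombAt_cast bomb i j).2 hO, Or.inl rfl⟩
    · refine ⟨((i - 1 : Nat) : Int), ⟨by omega, by omega⟩, (j : Int), ⟨by omega, by omega⟩,
        (pv_bombAt_cast bomb (i - 1) j).2 hO, Or.inr (Or.inl ⟨by omega, by omega, by omega, by omega, ?_⟩)⟩
      simp only [Prod.mk.injEq, and_true]; omega
    · refine ⟨((i + 1 : Nat) : Int), ⟨by omega, by omega⟩, (j : Int), ⟨by omega, by omega⟩,
        (pv_bombAt_cast bomb (i + 1) j).2 hO, Or.inr (Or.inr (Or.inl ⟨by omega, by omega, by omega, by omega, ?_⟩))⟩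
      simp only [Prod.mk.injEq, and_true]; omega
    · refine ⟨(i : Int), ⟨by omega, by omega⟩, ((j - 1 : Nat) : Int), ⟨by omega, by omega⟩,
        (pv_bombAt_cast bomb i (j - 1)).2 hO, Or.inr (Or.inr (Or.inr (Or.inl ⟨by omega, by omega, by omega, by omega, ?_⟩)))⟩
      simp only [Prod.mk.injEq, true_and]; omega
    · refine ⟨(i : Int), ⟨by omega, by omega⟩, ((j + 1 : Nat) : Int), ⟨by omega, by omega⟩,
        (pv_bombAt_cast bomb i (j + 1)).2 hO, Or.inr (Or.inr (Or.inr (Or.inr ⟨by omega, by omega, by omega, by omega, ?_⟩)))⟩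
      simp only [Prod.mk.injEq, true_and]; omega

-- B's bomb test and five-cell neighborhood test, named so the proof can talk about them
def pvCondB (bomb : List (List String)) (R C r c : Int) : Bool :=
  decide (0 ≤ r) && decide (r < R) && decide (0 ≤ c) && decide (c < C) &&
    (PySem.List.pyGetD (PySem.List.pyGetD bomb r []) c "" == "O")

def pvB5 (bomb : List (List String)) (R C r c : Int) : Bool :=
  pvCondB bomb R C r c || pvCondB bomb R C (r - 1) c || pvCondB bomb R C (r + 1) c
    || pvCondB bomb R C r (c - 1) || pvCondB bomb R C r (c + 1)

theorem pv_calc_py_alt_eq (base bomb : List (List String)) :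
    calc_py_alt base bomb =
      (PySem.List.enumerate base 0).map (fun p =>
        (PySem.List.pyRange 0 ((PySem.List.pyGetD base 0 []).length : Int) 1).foldl
          (fun new_row c =>
            if pvB5 bomb (base.length : Int) ((PySem.List.pyGetD base 0 []).length : Int) p.1 c
            then PySem.List.pySetD new_row c "." else new_row) p.2) := rfl

-- B's per-cell test agrees with pvBlastN on in-grid coordinates
theorem pv_condB_iff (bomb : List (List String)) (RN CN : Nat) (i j : Nat)
    (hi : i < RN) (hj : j < CN) :
    pvB5 bomb (RN : Int) (CN : Int) (i : Int) (j : Int) = true ↔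
      pvBlastN bomb RN CN i j = true := by
  simp only [pvB5, pvCondB, Bool.and_eq_true, Bool.or_eq_true, decide_eq_true_eq, beq_iff_eq]
  rw [pvBlastN]
  simp only [Bool.or_eq_true, Bool.and_eq_true, decide_eq_true_eq]
  constructor
  · rintro hor
    rcases hor with ((((⟨⟨⟨⟨-, -⟩, -⟩, -⟩, hO⟩ | ⟨⟨⟨⟨h0, -⟩, -⟩, -⟩, hO⟩) | ⟨⟨⟨⟨-, hR⟩, -⟩, -⟩, hO⟩) |
      ⟨⟨⟨⟨-, -⟩, h0⟩, -⟩, hO⟩) | ⟨⟨⟨⟨-, -⟩, -⟩, hC⟩, hO⟩)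
    · exact Or.inl (Or.inl (Or.inl (Or.inl ((pv_bombAt_cast bomb i j).1 hO))))
    · refine Or.inl (Or.inl (Or.inl (Or.inr ⟨by omega, ?_⟩)))
      rw [show ((i : Int) - 1) = ((i - 1 : Nat) : Int) from by omega] at hO
      exact (pv_bombAt_cast bomb (i - 1) j).1 hO
    · refine Or.inl (Or.inl (Or.inr ⟨by omega, ?_⟩))
      rw [show ((i : Int) + 1) = ((i + 1 : Nat) : Int) from by omega] at hO
      exact (pv_bombAt_cast bomb (i + 1) j).1 hO
    · refine Or.inl (Or.inr ⟨by omega, ?_⟩)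
      rw [show ((j : Int) - 1) = ((j - 1 : Nat) : Int) from by omega] at hO
      exact (pv_bombAt_cast bomb i (j - 1)).1 hO
    · refine Or.inr ⟨by omega, ?_⟩
      rw [show ((j : Int) + 1) = ((j + 1 : Nat) : Int) from by omega] at hO
      exact (pv_bombAt_cast bomb i (j + 1)).1 hO
  · rintro hor
    rcases hor with (((hO | ⟨h0, hO⟩) | ⟨hR, hO⟩) | ⟨hc0, hO⟩) | ⟨hcC, hO⟩
    · exact Or.inl (Or.inl (Or.inl (Or.inl ⟨⟨⟨⟨by omega, by omega⟩, by omega⟩, by omega⟩, (pv_bombAt_cast bomb i j).2 hO⟩)))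
    · refine Or.inl (Or.inl (Or.inl (Or.inr ⟨⟨⟨⟨by omega, by omega⟩, by omega⟩, by omega⟩, ?_⟩)))
      rw [show ((i : Int) - 1) = ((i - 1 : Nat) : Int) from by omega]
      exact (pv_bombAt_cast bomb (i - 1) j).2 hO
    · refine Or.inl (Or.inl (Or.inr ⟨⟨⟨⟨by omega, by omega⟩, by omega⟩, by omega⟩, ?_⟩))
      rw [show ((i : Int) + 1) = ((i + 1 : Nat) : Int) from by omega]
      exact (pv_bombAt_cast bomb (i + 1) j).2 hO
    · refine Or.inl (Or.inr ⟨⟨⟨⟨by omega, by omega⟩, by omega⟩, by omega⟩, ?_⟩)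
      rw [show ((j : Int) - 1) = ((j - 1 : Nat) : Int) from by omega]
      exact (pv_bombAt_cast bomb i (j - 1)).2 hO
    · refine Or.inr ⟨⟨⟨⟨by omega, by omega⟩, by omega⟩, by omega⟩, ?_⟩
      rw [show ((j : Int) + 1) = ((j + 1 : Nat) : Int) from by omega]
      exact (pv_bombAt_cast bomb i (j + 1)).2 hO

-- B's inner row fold: length preservation and cell characterization
theorem pv_rowfold_length (P : Int → Bool) (cs : List Int) (row : List String) :
    (cs.foldl (fun row c => if P c then PySem.List.pySetD row c "." else row) row).length
      = row.length := by
  induction cs generalizing row with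
  | nil => rfl
  | cons c cs ih =>
    rw [List.foldl_cons, ih]
    split_ifs
    · rw [PySem.List.length_pySetD]
    · rfl

theorem pv_rowfold_getD (P : Int → Bool) (cs : List Int) (hnn : ∀ c ∈ cs, 0 ≤ c)
    (row : List String) (j : Nat) :
    (cs.foldl (fun row c => if P c then PySem.List.pySetD row c "." else row) row).getD j ""
      = if (∃ c ∈ cs, P c = true ∧ c = (j : Int)) ∧ j < row.length then "."
        else row.getD j "" := by
  induction cs generalizing row with
  | nil => simp
  | cons c cs ih =>
    have hc := hnn c List.mem_cons_self
    obtain ⟨c', rfl⟩ : ∃ c' : Nat, c = (c' : Int) := ⟨c.toNat, by omega⟩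
    rw [List.foldl_cons, ih (fun q hq => hnn q (List.mem_cons_of_mem _ hq))]
    have hstep : (if P (c' : Int) then PySem.List.pySetD row (c' : Int) "." else row).length
        = row.length := by
      split_ifs
      · rw [PySem.List.length_pySetD]
      · rfl
    rw [hstep]
    have hstepget : (if P (c' : Int) then PySem.List.pySetD row (c' : Int) "." else row).getD j ""
        = if P (c' : Int) = true ∧ c' = j ∧ j < row.length then "." else row.getD j "" := by
      by_cases h1 : P (c' : Int) = true
      · rw [if_pos h1, PySem.List.pySetD_natCast, pv_getD_set]
        by_cases h2 : c' = j ∧ j < row.length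
        · rw [if_pos ⟨h2.1, by omega⟩, if_pos ⟨h1, h2.1, h2.2⟩]
        · rw [if_neg, if_neg (fun h => h2 ⟨h.2.1, h.2.2⟩)]
          rintro ⟨rfl, hlt⟩
          exact h2 ⟨rfl, hlt⟩
      · rw [if_neg h1, if_neg (fun h => h1 h.1)]
    rw [hstepget]
    by_cases hlt : j < row.length
    · by_cases hmem : ∃ q ∈ cs, P q = true ∧ q = (j : Int)
      · obtain ⟨q, hq, hPq, hqj⟩ := hmem
        rw [if_pos ⟨⟨q, hq, hPq, hqj⟩, hlt⟩,
          if_pos ⟨⟨q, List.mem_cons_of_mem _ hq, hPq, hqj⟩, hlt⟩]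
      · rw [if_neg (fun h => hmem h.1)]
        by_cases hc' : P (c' : Int) = true ∧ c' = j
        · rw [if_pos ⟨hc'.1, hc'.2, hlt⟩,
            if_pos ⟨⟨(c' : Int), List.mem_cons_self, hc'.1, by rw [hc'.2]⟩, hlt⟩]
        · rw [if_neg (fun h => hc' ⟨h.1, h.2.1⟩), if_neg]
          rintro ⟨⟨q, hq, hPq, rfl⟩, -⟩
          rcases List.mem_cons.1 hq with hqc | hq'
          · have hcj : c' = j := by exact_mod_cast hqc.symm
            subst hcj
            exact hc' ⟨hPq, rfl⟩
          · exact hmem ⟨_, hq', hPq, rfl⟩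
    · rw [if_neg (fun h => hlt h.2), if_neg (fun h => hlt h.2.2), if_neg (fun h => hlt h.2)]

-- ===== VERDICT (by name: the statement is the Claim_ definition above) =====
set_option maxHeartbeats 1000000 in
theorem calc_py_spec : Claim_equal_calc_py := by
  unfold Claim_equal_calc_py
  intro base bomb _hdom hpre
  obtain ⟨-, -, -⟩ := hpre
  rw [Spec_calc_py, pv_calc_py_eq, pv_calc_py_alt_eq]
  have hnn := pv_explode_nonneg base bomb
  apply List.ext_getElem
  · rw [pvWriteFold_length, List.length_map, PySem.List.length_enumerate]
  · intro i h1 h2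
    have hiR : i < base.length := by rwa [pvWriteFold_length] at h1
    have hrowA : (pvWriteFold (pvExplode base bomb) base)[i] =
        (pvWriteFold (pvExplode base bomb) base).getD i [] :=
      (List.getD_eq_getElem _ _ h1).symm
    have hrowbase : base.getD i [] = base[i] := List.getD_eq_getElem _ _ hiR
    simp only [List.getElem_map, PySem.List.getElem_enumerate, zero_add]
    apply List.ext_getElem
    · rw [hrowA, pvWriteFold_row_length _ hnn, hrowbase, pv_rowfold_length]
    · intro j hj1 hj2
      have hjrow : j < (base.getD i []).length := by
        rw [hrowA, pvWriteFold_row_length _ hnn] at hj1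
        exact hj1
      -- A side value
      have hA : ((pvWriteFold (pvExplode base bomb) base).getD i []).getD j "" =
          (pvWriteFold (pvExplode base bomb) base)[i][j] := by
        rw [← hrowA]
        exact List.getD_eq_getElem _ _ hj1
      rw [← hA, pvWriteFold_getD _ hnn]
      -- B side value
      rw [(List.getD_eq_getElem _ "" hj2).symm,
        pv_rowfold_getD _ _ (fun c hc => (PySem.List.mem_pyRange_one.1 hc).1)]
      -- characterize membership in A's explode set
      have hmem : (((i : Int), (j : Int)) ∈ pvExplode base bomb) ↔
          (i < base.length ∧ j < (PySem.List.pyGetD base 0 []).length ∧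
            pvBlastN bomb base.length (PySem.List.pyGetD base 0 []).length i j = true) := by
        rw [pv_mem_explode, pv_explode_iff_blast]
      have hex : (∃ c ∈ PySem.List.pyRange 0 ((PySem.List.pyGetD base 0 []).length : Int) 1,
            pvB5 bomb (base.length : Int) ((PySem.List.pyGetD base 0 []).length : Int) (i : Int) c = true
              ∧ c = (j : Int)) ↔
          (j < (PySem.List.pyGetD base 0 []).length ∧
            pvB5 bomb (base.length : Int) ((PySem.List.pyGetD base 0 []).length : Int) (i : Int) (j : Int) = true) := by
        constructor
        · rintro ⟨c, hcmem, hP, rfl⟩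
          have := (PySem.List.mem_pyRange_one.1 hcmem).2
          exact ⟨by exact_mod_cast this, hP⟩
        · rintro ⟨hjC, hP⟩
          exact ⟨(j : Int), PySem.List.mem_pyRange_one.2 ⟨by omega, by exact_mod_cast hjC⟩, hP, rfl⟩
      by_cases hb : j < (PySem.List.pyGetD base 0 []).length ∧
          pvBlastN bomb base.length (PySem.List.pyGetD base 0 []).length i j = true
      · rw [if_pos ⟨hmem.2 ⟨hiR, hb.1, hb.2⟩, hiR, hjrow⟩,
          if_pos ⟨hex.2 ⟨hb.1, (pv_condB_iff bomb base.length
            (PySem.List.pyGetD base 0 []).length i j hiR hb.1).2 hb.2⟩,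
            by rw [← hrowbase]; exact hjrow⟩]
      · rw [if_neg, if_neg, hrowbase]
        · rintro ⟨hexm, -⟩
          obtain ⟨hjC, hP⟩ := hex.1 hexm
          exact hb ⟨hjC, (pv_condB_iff bomb base.length
            (PySem.List.pyGetD base 0 []).length i j hiR hjC).1 hP⟩
        · rintro ⟨hm, -, -⟩
          exact hb (hmem.1 hm).2
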